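-- pv_equiv track=rewrite | github.com/kfklaihk/Works | parse_mappings_colab_10.py | split_paren
-- ===== SOURCE A (Python) =====
-- def split_paren(s, delim=','):
--     parts, depth, cur = [], 0, ""
--     for c in s:
--         if c == '(': depth += 1; cur += c
--         elif c == ')': depth -= 1; cur += c
--         elif c == delim and depth == 0: parts.append(cur.strip()); cur = ""
--         else: cur += c
--     return parts + [cur.strip()] if cur.strip() else parts
-- ===== SOURCE B (Python) =====
-- def split_paren(s, delim=','):
--     # Two-phase: collect depth-0 delimiter positions, then slice and strip.
--     depth = 0
--     bounds = []
--     for i, c in enumerate(s):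
--         if c == '(':
--             depth += 1
--         elif c == ')':
--             depth -= 1
--         elif c == delim and depth == 0:
--             bounds.append(i)
--     segs = []
--     start = 0
--     for b in bounds:
--         segs.append(s[start:b].strip())
--         start = b + 1
--     last = s[start:].strip()
--     return segs + [last] if last else segs
-- ===== Notes on version B (the rewrite author's own statement) =====
-- stated objective: alternative
-- what changed: B first scans once to record the indices of depth-0 delimiter occurrences, then slices the string at those boundaries and strips each segment, instead of A's character-by-character accumulation of the current segment.
import Mathlib
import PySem

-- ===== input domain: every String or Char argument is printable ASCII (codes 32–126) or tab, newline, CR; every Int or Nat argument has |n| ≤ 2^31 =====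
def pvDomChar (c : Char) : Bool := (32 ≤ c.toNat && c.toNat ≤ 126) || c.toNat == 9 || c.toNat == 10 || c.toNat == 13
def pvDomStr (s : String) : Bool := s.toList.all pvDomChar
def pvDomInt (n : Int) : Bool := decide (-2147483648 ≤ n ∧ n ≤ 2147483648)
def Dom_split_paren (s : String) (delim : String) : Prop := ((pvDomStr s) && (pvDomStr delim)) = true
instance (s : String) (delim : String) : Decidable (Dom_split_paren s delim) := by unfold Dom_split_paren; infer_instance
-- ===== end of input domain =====

-- B computes the depth-0 delimiter positions first and then slices, instead of
-- accumulating characters one by one (objective: alternative decomposition).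

-- ===== PORT A =====
-- the character loop of A: state (parts, depth, cur)
def splitLoopA (D : List Char) : List Char → List (List Char) → Int → List Char → List (List Char) × Int × List Char
  | [], parts, depth, cur => (parts, depth, cur)
  | c :: cs, parts, depth, cur =>
    if c = '(' then splitLoopA D cs parts (depth + 1) (cur ++ [c])
    else if c = ')' then splitLoopA D cs parts (depth - 1) (cur ++ [c])
    else if [c] = D ∧ depth = 0 then splitLoopA D cs (parts ++ [PySem.Chars.strip cur]) depth []
    else splitLoopA D cs parts depth (cur ++ [c])

def split_paren (s : String) (delim : String) : List String :=
  let r := splitLoopA delim.toList s.toList [] 0 []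
  if PySem.Chars.strip r.2.2 ≠ [] then (r.1 ++ [PySem.Chars.strip r.2.2]).map String.mk
  else r.1.map String.mk

-- ===== PORT B =====
-- first pass of B: depth-0 delimiter indices
def boundsLoopB (D : List Char) : List (Int × Char) → Int → List Int → Int × List Int
  | [], depth, bs => (depth, bs)
  | ic :: rest, depth, bs =>
    if ic.2 = '(' then boundsLoopB D rest (depth + 1) bs
    else if ic.2 = ')' then boundsLoopB D rest (depth - 1) bs
    else if [ic.2] = D ∧ depth = 0 then boundsLoopB D rest depth (bs ++ [ic.1])
    else boundsLoopB D rest depth bs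

-- second pass of B: slice between consecutive bounds and strip
def segsLoopB (cs : List Char) : List Int → List (List Char) → Int → List (List Char) × Int
  | [], segs, start => (segs, start)
  | b :: bs, segs, start =>
    segsLoopB cs bs (segs ++ [PySem.Chars.strip (PySem.List.slice cs (some start) (some b))]) (b + 1)

def split_paren_alt (s : String) (delim : String) : List String :=
  let cs := s.toList
  let bs := (boundsLoopB delim.toList (PySem.List.enumerate cs 0) 0 []).2
  let p := segsLoopB cs bs [] 0
  let last := PySem.Chars.strip (PySem.List.slice cs (some p.2) none)
  if last ≠ [] then (p.1 ++ [last]).map String.mk else p.1.map String.mk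

-- ===== PRECONDITION & SPEC =====
def Spec_split_paren (s : String) (delim : String) (out : List String) : Prop := out = split_paren_alt s delim
instance (s : String) (delim : String) (out : List String) : Decidable (Spec_split_paren s delim out) := by unfold Spec_split_paren; infer_instance

-- ===== CLAIM (what is proved, stated in full; the proofs are below) =====
def Claim_equal_split_paren : Prop := ∀ (s : String) (delim : String), Dom_split_paren s delim → Spec_split_paren s delim (split_paren s delim)

-- ===== LEMMAS AND PROOFS =====

-- A's finishing step applied to a loop state
def finishA (st : List (List Char) × Int × List Char) : List String :=
  if PySem.Chars.strip st.2.2 ≠ [] then (st.1 ++ [PySem.Chars.strip st.2.2]).map String.mk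
  else st.1.map String.mk

-- B's finishing step applied to (segs, start)
def finishB (cs : List Char) (p : List (List Char) × Int) : List String :=
  let last := PySem.Chars.strip (PySem.List.slice cs (some p.2) none)
  if last ≠ [] then (p.1 ++ [last]).map String.mk else p.1.map String.mk

lemma boundsLoopB_acc (D : List Char) (l : List (Int × Char)) : ∀ (d : Int) (bs : List Int),
    (boundsLoopB D l d bs).2 = bs ++ (boundsLoopB D l d []).2 := by
  induction l with
  | nil => intro d bs; simp only [boundsLoopB, List.append_nil]
  | cons ic rest ih =>
    intro d bs
    simp only [boundsLoopB]
    by_cases h1 : ic.2 = '('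
    · rw [if_pos h1, if_pos h1, ih]
    · rw [if_neg h1, if_neg h1]
      by_cases h2 : ic.2 = ')'
      · rw [if_pos h2, if_pos h2, ih]
      · rw [if_neg h2, if_neg h2]
        by_cases h3 : [ic.2] = D ∧ d = 0
        · rw [if_pos h3, if_pos h3, ih, ih (bs := [] ++ [ic.1])]
          simp
        · rw [if_neg h3, if_neg h3, ih]

-- the central invariant: B's two phases on the suffix of `full` starting at k
-- compute A's loop on that suffix, where A's `cur` is full[start:k]
lemma key (D full : List Char) : ∀ (cs : List Char) (k : Nat) (d : Int) (segs : List (List Char)) (start : Nat),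
    start ≤ k → cs = full.drop k →
    finishB full (segsLoopB full (boundsLoopB D (PySem.List.enumerate cs (k : Int)) d []).2 segs (start : Int)) =
    finishA (splitLoopA D cs segs d ((full.drop start).take (k - start))) := by
  intro cs
  induction cs with
  | nil =>
    intro k d segs start hsk hdrop
    have hlen : full.length ≤ k := List.drop_eq_nil_iff.mp hdrop.symm
    simp only [PySem.List.enumerate_nil, boundsLoopB, segsLoopB, splitLoopA, finishA, finishB]
    rw [PySem.List.slice_from_natCast]
    have htake : (full.drop start).take (k - start) = full.drop start := by
      apply List.take_of_length_le
      simp; omega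
    rw [htake]
  | cons c rest ih =>
    intro k d segs start hsk hdrop
    have hk : k < full.length := by
      by_contra h
      have : full.drop k = [] := List.drop_eq_nil_iff.mpr (by omega)
      rw [this] at hdrop; exact absurd hdrop (by simp)
    have hsplit : full[k] :: full.drop (k + 1) = full.drop k := List.getElem_cons_drop hk
    rw [← hdrop] at hsplit
    have hc : full[k] = c := (List.cons_eq_cons.mp hsplit).1
    have hrest : rest = full.drop (k + 1) := (List.cons_eq_cons.mp hsplit).2.symm
    have hext : ∀ st : Nat, st ≤ k → (full.drop st).take (k + 1 - st) = (full.drop st).take (k - st) ++ [c] := by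
      intro st hst
      have h1 : k + 1 - st = (k - st) + 1 := by omega
      rw [h1, List.take_add_one]
      have h2 : (full.drop st)[k - st]? = some c := by
        rw [List.getElem?_drop]
        have h3 : st + (k - st) = k := by omega
        rw [h3, List.getElem?_eq_getElem hk, hc]
      simp [h2]
    have hcast : ((k : Int) + 1) = ((k + 1 : Nat) : Int) := by push_cast; ring
    rw [PySem.List.enumerate_cons]
    simp only [splitLoopA, boundsLoopB]
    by_cases h1 : c = '('
    · simp only [if_pos h1]
      rw [← hext start hsk, hcast]
      exact ih (k + 1) (d + 1) segs start (by omega) hrest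
    · simp only [if_neg h1]
      by_cases h2 : c = ')'
      · simp only [if_pos h2]
        rw [← hext start hsk, hcast]
        exact ih (k + 1) (d - 1) segs start (by omega) hrest
      · simp only [if_neg h2]
        by_cases h3 : [c] = D ∧ d = 0
        · simp only [if_pos h3]
          rw [boundsLoopB_acc]
          simp only [List.nil_append, List.cons_append, segsLoopB]
          rw [PySem.List.slice_natCast, hcast]
          have hres := ih (k + 1) d (segs ++ [PySem.Chars.strip ((full.drop start).take (k - start))]) (k + 1) (le_refl _) hrest
          rw [hres]
          have hnil : (full.drop (k + 1)).take (k + 1 - (k + 1)) = [] := by simp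
          rw [hnil]
        · simp only [if_neg h3]
          rw [← hext start hsk, hcast]
          exact ih (k + 1) d segs start (by omega) hrest

-- ===== VERDICT (by name: the statement is the Claim_ definition above) =====
theorem split_paren_spec : Claim_equal_split_paren := by
  intro s delim _
  show split_paren s delim = split_paren_alt s delim
  have h := key delim.toList s.toList s.toList 0 0 [] 0 (le_refl _) (by simp)
  simp only [Nat.cast_zero, List.drop_zero, Nat.sub_zero, List.take_zero] at h
  simpa only [split_paren, split_paren_alt, finishA, finishB] using h.symm
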